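-- pv_equiv track=rewrite | github.com/wylflc/AShareQuant | scripts/fetch_hong_kong_research_evidence.py | token_between
-- ===== SOURCE A (Python) =====
-- def token_between(tokens: list[str], start_label: str, end_labels: set[str]) -> list[str]:
--     try:
--         start_index = tokens.index(start_label) + 1
--     except ValueError:
--         return []
--     end_index = len(tokens)
--     for index in range(start_index, len(tokens)):
--         if tokens[index] in end_labels:
--             end_index = index
--             break
--     return [token for token in tokens[start_index:end_index] if token and token != "--"]
-- ===== SOURCE B (Python) =====
-- def token_between(tokens: list[str], start_label: str, end_labels: set[str]) -> list[str]:
--     try: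
--         start_index = tokens.index(start_label) + 1
--     except ValueError:
--         return []
--     result = []
--     for token in tokens[start_index:]:
--         if token in end_labels:
--             break
--         if token and token != "--":
--             result.append(token)
--     return result
-- ===== Notes on version B (the rewrite author's own statement) =====
-- stated objective: simpler
-- what changed: Replaced A's two-phase structure (an index-scanning loop to locate the end label, then a filtering comprehension over a slice) by a single accumulating pass over the suffix that breaks at the first end label and filters as it goes.
import Mathlib
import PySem

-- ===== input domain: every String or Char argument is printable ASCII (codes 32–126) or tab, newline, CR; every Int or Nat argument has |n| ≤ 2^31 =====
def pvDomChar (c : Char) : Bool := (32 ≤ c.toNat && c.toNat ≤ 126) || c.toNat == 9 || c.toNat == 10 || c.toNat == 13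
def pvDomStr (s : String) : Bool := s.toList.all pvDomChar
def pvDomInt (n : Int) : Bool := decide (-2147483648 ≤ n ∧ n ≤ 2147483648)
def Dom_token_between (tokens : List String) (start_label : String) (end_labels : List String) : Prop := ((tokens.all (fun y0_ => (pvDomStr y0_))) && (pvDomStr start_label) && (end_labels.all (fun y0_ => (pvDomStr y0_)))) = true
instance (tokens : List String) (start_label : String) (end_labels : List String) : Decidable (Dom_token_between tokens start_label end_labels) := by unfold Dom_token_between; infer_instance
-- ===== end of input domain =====

-- B fuses A's end-index scan and filtering comprehension into one accumulating pass (same O(n) cost, simpler shape); return values proved equal on all inputs.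


-- ===== PORT A =====
-- A's 'for index in range(start_index, len(tokens)): if tokens[index] in end_labels: end_index = index; break'
-- as a recursion over the index list, carrying end_index (= len(tokens)) as the no-break value.
-- tokens[index] is ported as pyGetD with default "": every index produced by the range is in bounds, so this is exact.
def tbFindEnd (tokens : List String) (end_labels : List String) : List Int → Int → Int
  | [], e => e
  | i :: rest, e =>
    if end_labels.contains (PySem.List.pyGetD tokens i "") then i
    else tbFindEnd tokens end_labels rest e

def token_between (tokens : List String) (start_label : String) (end_labels : List String) : List String :=
  match PySem.List.index? tokens start_label with
  | none => []                                  -- except ValueError: return []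
  | some i =>
    let start_index : Int := (i : Int) + 1
    let end_index : Int :=
      tbFindEnd tokens end_labels (PySem.List.pyRange start_index (tokens.length : Int) 1) (tokens.length : Int)
    (PySem.List.slice tokens (some start_index) (some end_index)).filter
      (fun t => t ≠ "" && t ≠ "--")

-- ===== PORT B =====
-- single pass over tokens[start_index:]: break at an end label, otherwise filter-and-accumulate.
def tbGo (end_labels : List String) : List String → List String
  | [] => []
  | t :: rest =>
    if end_labels.contains t then []
    else if t ≠ "" && t ≠ "--" then t :: tbGo end_labels rest
    else tbGo end_labels rest

def token_between_alt (tokens : List String) (start_label : String) (end_labels : List String) : List String :=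
  match PySem.List.index? tokens start_label with
  | none => []
  | some i => tbGo end_labels (PySem.List.slice tokens (some ((i : Int) + 1)) none)

-- ===== PRECONDITION & SPEC =====
def Spec_token_between (tokens : List String) (start_label : String) (end_labels : List String) (out : List String) : Prop := out = token_between_alt tokens start_label end_labels
instance (tokens : List String) (start_label : String) (end_labels : List String) (out : List String) : Decidable (Spec_token_between tokens start_label end_labels out) := by unfold Spec_token_between; infer_instance

-- ===== CLAIM (what is proved, stated in full; the proofs are below) =====
def Claim_equal_token_between : Prop := ∀ (tokens : List String) (start_label : String) (end_labels : List String), Dom_token_between tokens start_label end_labels → Spec_token_between tokens start_label end_labels (token_between tokens start_label end_labels)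

-- ===== LEMMAS AND PROOFS =====

-- A's end-finding loop over range(s, len) computes s + findIdx on the suffix (findIdx = length when no hit).
theorem tbFindEnd_eq_findIdx (tokens E : List String) :
    ∀ (n s : Nat), s + n = tokens.length →
      tbFindEnd tokens E (PySem.List.pyRange (s : Int) (tokens.length : Int) 1) (tokens.length : Int)
        = ((s : Int) + ((tokens.drop s).findIdx (fun t => E.contains t) : Int)) := by
  intro n
  induction n with
  | zero =>
    intro s hs
    have h1 : (tokens.length : Int) ≤ (s : Int) := by omega
    rw [PySem.List.pyRange_one_eq_nil h1]
    have : tokens.drop s = [] := by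
      apply List.drop_eq_nil_of_le; omega
    simp [tbFindEnd, this]
    omega
  | succ n ih =>
    intro s hs
    have hlt : s < tokens.length := by omega
    have h1 : (s : Int) < (tokens.length : Int) := by exact_mod_cast hlt
    rw [PySem.List.pyRange_one_cons h1]
    have hget : PySem.List.pyGetD tokens (s : Int) "" = tokens[s] := by
      rw [PySem.List.pyGetD_natCast]
      exact List.getD_eq_getElem tokens "" hlt
    have hdrop : tokens.drop s = tokens[s] :: tokens.drop (s + 1) :=
      (List.getElem_cons_drop hlt).symm
    by_cases hc : tokens[s] ∈ E
    · have hcb : E.contains tokens[s] = true := by simpa [List.contains_eq_mem] using hc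
      simp only [tbFindEnd, hget, hcb, if_true]
      rw [hdrop, List.findIdx_cons]
      simp [hc]
    · have hcb : E.contains tokens[s] = false := by simpa [List.contains_eq_mem] using hc
      simp only [tbFindEnd, hget, hcb, Bool.false_eq_true, if_false]
      rw [show (s : Int) + 1 = ((s + 1 : Nat) : Int) by push_cast; ring,
        ih (s + 1) (by omega), hdrop, List.findIdx_cons]
      simp [hc]
      push_cast; ring
  
-- B's fused loop equals: filter the take up to the first hit.
theorem tbGo_eq_filter_take (E : List String) (l : List String) :
    tbGo E l = (l.take (l.findIdx (fun t => E.contains t))).filter (fun t => t ≠ "" && t ≠ "--") := by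
  induction l with
  | nil => simp [tbGo]
  | cons t rest ih =>
    by_cases hc : t ∈ E
    · simp [tbGo, hc, List.findIdx_cons]
    · simp only [tbGo, List.findIdx_cons, List.contains_eq_mem, hc, decide_false,
        Bool.false_eq_true, if_false, cond_false]
      rw [ih]
      simp [List.filter_cons, List.take_succ_cons]

-- ===== VERDICT (by name: the statement is the Claim_ definition above) =====
theorem token_between_spec : Claim_equal_token_between := by
  intro tokens start_label end_labels _
  unfold Spec_token_between token_between token_between_alt
  cases h : PySem.List.index? tokens start_label with
  | none => rfl
  | some i =>
    obtain ⟨hi, -, -⟩ := PySem.List.getElem_of_index?_eq_some h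
    simp only
    have hle : i + 1 ≤ tokens.length := hi
    have hcast : (i : Int) + 1 = ((i + 1 : Nat) : Int) := by push_cast; ring
    rw [hcast,
      tbFindEnd_eq_findIdx tokens end_labels (tokens.length - (i + 1)) (i + 1) (by omega)]
    set k := ((tokens.drop (i + 1)).findIdx (fun t => end_labels.contains t)) with hk
    rw [show ((i + 1 : Nat) : Int) + (k : Int) = (((i + 1) + k : Nat) : Int) by push_cast; ring]
    rw [PySem.List.slice_natCast, PySem.List.slice_from_natCast]
    rw [tbGo_eq_filter_take]
    rw [show i + 1 + k - (i + 1) = k by omega, hk]
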